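-- pv_equiv track=rewrite | github.com/lalit97/DSA | stack-queue/z-joe-and-books.py | left_books
-- ===== SOURCE A (Python) =====
-- def left_books(books, n, k):
--     start = 0
--     end = n - 1
--     count = 0
--     while end > start:
--         f_chap = books[start]
--         if k >= f_chap:
--             start += 1
--             count += 1
--
--         b_chap = books[end]
--         if k >= b_chap:
--             end -= 1
--             count += 1
--
--         if k < f_chap and k < b_chap:
--             break
--
--     return n - count
-- ===== SOURCE B (Python) =====
-- def left_books(books, n, k):
--     # Two independent one-directional scans instead of A's interleaved two-pointer loop.
--     L = 0
--     while L < n and books[L] <= k: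
--         L += 1
--     if L == n:
--         # every book is readable; the alternating reader leaves one middle book for odd n
--         return n % 2
--     R = 0
--     # scan from the right, only over the books strictly after position L
--     while R < n - 1 - L and books[n - 1 - R] <= k:
--         R += 1
--     return n - L - R
-- ===== Notes on version B (the rewrite author's own statement) =====
-- stated objective: simpler
-- what changed: Replaces A's single interleaved two-pointer meeting loop with two independent one-directional scans (prefix run L, suffix run R over the books after position L) plus the closed-form observation that when the whole array is readable the alternating reader leaves exactly n % 2 books, returning n - L - R otherwise.
-- outside the precondition, e.g. on left_books([], 1, 0): A returns 1, B raises IndexError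
import Mathlib
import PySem

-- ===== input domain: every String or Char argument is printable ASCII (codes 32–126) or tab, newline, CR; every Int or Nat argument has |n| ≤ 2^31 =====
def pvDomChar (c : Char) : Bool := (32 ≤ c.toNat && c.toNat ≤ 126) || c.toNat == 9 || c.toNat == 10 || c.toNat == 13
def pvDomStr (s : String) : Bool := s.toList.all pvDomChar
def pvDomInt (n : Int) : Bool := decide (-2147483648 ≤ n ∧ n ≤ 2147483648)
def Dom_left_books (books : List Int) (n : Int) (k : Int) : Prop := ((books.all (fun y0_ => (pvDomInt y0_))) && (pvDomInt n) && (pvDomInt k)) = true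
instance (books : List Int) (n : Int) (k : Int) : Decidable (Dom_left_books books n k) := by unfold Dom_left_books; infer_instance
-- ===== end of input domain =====

-- B replaces A's interleaved two-pointer loop by two independent directional scans plus
-- the n % 2 closed form for the all-readable case (objective: simpler); equal on Pre_.

-- ===== PORT A =====
-- A's while loop; fuel n.toNat is enough since end - start shrinks every non-breaking
-- iteration.  pyGet? = none is Python's IndexError (excluded by Pre_); we return count there.
def leftLoopA (books : List Int) (k : Int) : Nat → Int → Int → Int → Int
  | 0, _, _, count => count
  | fuel+1, start, end_, count =>
    if end_ > start then
      match PySem.List.pyGet? books start with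
      | none => count          -- IndexError, outside Pre_
      | some f_chap =>
        let start' := if k ≥ f_chap then start + 1 else start
        let count' := if k ≥ f_chap then count + 1 else count
        match PySem.List.pyGet? books end_ with
        | none => count'       -- IndexError, outside Pre_
        | some b_chap =>
          let end' := if k ≥ b_chap then end_ - 1 else end_
          let count'' := if k ≥ b_chap then count' + 1 else count'
          if k < f_chap ∧ k < b_chap then count''
          else leftLoopA books k fuel start' end' count''
    else count

def left_books (books : List Int) (n : Int) (k : Int) : Int :=
  n - leftLoopA books k n.toNat 0 (n - 1) 0

-- ===== PORT B =====
-- B's first while loop: L advances while L < n and books[L] <= k.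
def scanLB (books : List Int) (n k : Int) : Nat → Int → Int
  | 0, L => L
  | fuel+1, L =>
    if L < n then
      match PySem.List.pyGet? books L with
      | some x => if x ≤ k then scanLB books n k fuel (L+1) else L
      | none => L              -- IndexError, outside Pre_
    else L

-- B's second while loop: R advances while R < n - 1 - L and books[n-1-R] <= k.
def scanRB (books : List Int) (n k L : Int) : Nat → Int → Int
  | 0, R => R
  | fuel+1, R =>
    if R < n - 1 - L then
      match PySem.List.pyGet? books (n - 1 - R) with
      | some x => if x ≤ k then scanRB books n k L fuel (R+1) else R
      | none => R              -- IndexError, outside Pre_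
    else R

def left_books_alt (books : List Int) (n : Int) (k : Int) : Int :=
  let L := scanLB books n k n.toNat 0
  if L = n then PySem.Int.mod n 2
  else
    let R := scanRB books n k L n.toNat 0
    n - L - R

-- ===== PRECONDITION & SPEC =====
-- Pre_ excludes only n > len(books) with 1 ≤ n: for n ≥ 2 A raises IndexError there, and
-- at the single corner n = 1 with an empty list A returns 1 while B itself raises.
def Pre_left_books (books : List Int) (n : Int) (k : Int) : Prop :=
  n ≤ (books.length : Int) ∨ n ≤ 0
instance (books : List Int) (n : Int) (k : Int) : Decidable (Pre_left_books books n k) := by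
  unfold Pre_left_books; infer_instance

def pvWitness_left_books : List Int × Int × Int := ([1, 5, 2], 3, 2)

def Spec_left_books (books : List Int) (n : Int) (k : Int) (out : Int) : Prop := out = left_books_alt books n k
instance (books : List Int) (n : Int) (k : Int) (out : Int) : Decidable (Spec_left_books books n k out) := by unfold Spec_left_books; infer_instance

-- ===== CLAIM (what is proved, stated in full; the proofs are below) =====
def Claim_equal_left_books : Prop := ∀ (books : List Int) (n : Int) (k : Int), Dom_left_books books n k → Pre_left_books books n k → Spec_left_books books n k (left_books books n k)

-- ===== LEMMAS AND PROOFS =====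

lemma get_some (books : List Int) (i : Int) (h0 : 0 ≤ i) (h1 : i < (books.length : Int)) :
    PySem.List.pyGet? books i = some (PySem.List.pyGetD books i 0) := by
  rw [PySem.List.pyGet?_eq_some_getElem books h0 h1,
      PySem.List.pyGetD_eq_getElem books 0 h0 h1]

lemma scanLB_spec (books : List Int) (n k : Int) (hlen : n ≤ (books.length : Int)) :
    ∀ (fuel : Nat) (j : Int), 0 ≤ j → j ≤ n → n ≤ (fuel : Int) + j →
      j ≤ scanLB books n k fuel j ∧ scanLB books n k fuel j ≤ n ∧
      (∀ i, j ≤ i → i < scanLB books n k fuel j → PySem.List.pyGetD books i 0 ≤ k) ∧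
      (scanLB books n k fuel j < n → k < PySem.List.pyGetD books (scanLB books n k fuel j) 0) := by
  intro fuel
  induction fuel with
  | zero =>
    intro j h0 h1 h2
    simp only [scanLB]
    refine ⟨le_refl j, h1, ?_, ?_⟩
    · intro i hi1 hi2; exact absurd hi2 (by omega)
    · intro h; exact absurd h (by simp at h2; omega)
  | succ fuel ih =>
    intro j h0 h1 h2
    by_cases hj : j < n
    · have hget := get_some books j h0 (by omega)
      simp only [scanLB, if_pos hj, hget]
      by_cases hx : PySem.List.pyGetD books j 0 ≤ k
      · simp only [if_pos hx]
        obtain ⟨a1, a2, a3, a4⟩ := ih (j+1) (by omega) (by omega) (by push_cast at h2 ⊢; omega)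
        refine ⟨by omega, a2, ?_, a4⟩
        intro i hi1 hi2
        rcases eq_or_lt_of_le hi1 with h | h
        · rw [← h]; exact hx
        · exact a3 i (by omega) hi2
      · simp only [if_neg hx]
        refine ⟨le_refl j, by omega, ?_, fun _ => not_le.mp hx⟩
        intro i hi1 hi2; exact absurd hi2 (by omega)
    · simp only [scanLB, if_neg hj]
      refine ⟨le_refl j, h1, ?_, fun h => absurd h hj⟩
      intro i hi1 hi2; exact absurd hi2 (by omega)

lemma scanRB_spec (books : List Int) (n k Lv : Int) (hlen : n ≤ (books.length : Int))
    (hL0 : 0 ≤ Lv) (_hLn : Lv < n) (hLbad : k < PySem.List.pyGetD books Lv 0) :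
    ∀ (fuel : Nat) (j : Int), 0 ≤ j → j ≤ n - 1 - Lv → n - 1 - Lv ≤ (fuel : Int) + j →
      j ≤ scanRB books n k Lv fuel j ∧ scanRB books n k Lv fuel j ≤ n - 1 - Lv ∧
      (∀ i, j ≤ i → i < scanRB books n k Lv fuel j → PySem.List.pyGetD books (n - 1 - i) 0 ≤ k) ∧
      k < PySem.List.pyGetD books (n - 1 - scanRB books n k Lv fuel j) 0 := by
  intro fuel
  induction fuel with
  | zero =>
    intro j h0 h1 h2
    simp only [scanRB]
    have hj : j = n - 1 - Lv := by simp at h2; omega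
    refine ⟨le_refl j, h1, ?_, ?_⟩
    · intro i hi1 hi2; exact absurd hi2 (by omega)
    · rw [show n - 1 - j = Lv from by omega]; exact hLbad
  | succ fuel ih =>
    intro j h0 h1 h2
    by_cases hjlt : j < n - 1 - Lv
    · have hget := get_some books (n - 1 - j) (by omega) (by omega)
      simp only [scanRB, if_pos hjlt, hget]
      by_cases hx : PySem.List.pyGetD books (n - 1 - j) 0 ≤ k
      · simp only [if_pos hx]
        obtain ⟨a1, a2, a3, a4⟩ := ih (j+1) (by omega) (by omega) (by push_cast at h2 ⊢; omega)
        refine ⟨by omega, a2, ?_, a4⟩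
        intro i hi1 hi2
        rcases eq_or_lt_of_le hi1 with h | h
        · rw [← h]; exact hx
        · exact a3 i (by omega) hi2
      · simp only [if_neg hx]
        refine ⟨le_refl j, h1, ?_, not_le.mp hx⟩
        intro i hi1 hi2; exact absurd hi2 (by omega)
    · have hj : j = n - 1 - Lv := by omega
      simp only [scanRB, if_neg hjlt]
      refine ⟨le_refl j, h1, ?_, ?_⟩
      · intro i hi1 hi2; exact absurd hi2 (by omega)
      · rw [show n - 1 - j = Lv from by omega]; exact hLbad

lemma loopA_lt (books : List Int) (n k Lv Rv : Int) (hlen : n ≤ (books.length : Int))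
    (_hL0 : 0 ≤ Lv) (_hLn : Lv < n)
    (hLgood : ∀ i, 0 ≤ i → i < Lv → PySem.List.pyGetD books i 0 ≤ k)
    (hLbad : k < PySem.List.pyGetD books Lv 0)
    (hR0 : 0 ≤ Rv) (hRb : Rv ≤ n - 1 - Lv)
    (hRgood : ∀ i, 0 ≤ i → i < Rv → PySem.List.pyGetD books (n - 1 - i) 0 ≤ k)
    (hRbad : k < PySem.List.pyGetD books (n - 1 - Rv) 0) :
    ∀ (fuel : Nat) (f b : Int), 0 ≤ f → f ≤ Lv → 0 ≤ b → b ≤ Rv →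
      (n - 1 - b) - f ≤ (fuel : Int) →
      leftLoopA books k fuel f (n - 1 - b) (f + b) = Lv + Rv := by
  intro fuel
  induction fuel with
  | zero =>
    intro f b hf0 hfL hb0 hbR hfuel
    simp only [leftLoopA]
    simp at hfuel
    omega
  | succ fuel ih =>
    intro f b hf0 hfL hb0 hbR hfuel
    by_cases he : n - 1 - b > f
    · have hgf := get_some books f hf0 (by omega)
      have hge := get_some books (n - 1 - b) (by omega) (by omega)
      simp only [leftLoopA, if_pos he, hgf, hge]
      push_cast at hfuel
      by_cases hf : f < Lv
      · have hgfk : PySem.List.pyGetD books f 0 ≤ k := hLgood f hf0 hf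
        by_cases hb : b < Rv
        · have hgek : PySem.List.pyGetD books (n - 1 - b) 0 ≤ k := hRgood b hb0 hb
          rw [if_pos hgfk, if_pos hgfk, if_pos hgek, if_pos hgek,
              if_neg (by intro h; exact absurd hgfk (not_le.mpr h.1))]
          rw [show n - 1 - b - 1 = n - 1 - (b + 1) from by ring,
              show f + b + 1 + 1 = (f + 1) + (b + 1) from by ring]
          exact ih (f + 1) (b + 1) (by omega) (by omega) (by omega) (by omega) (by omega)
        · have hbe : b = Rv := by omega
          have hgek : ¬ PySem.List.pyGetD books (n - 1 - b) 0 ≤ k := by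
            rw [hbe]; exact not_le.mpr hRbad
          rw [if_pos hgfk, if_pos hgfk, if_neg hgek, if_neg hgek,
              if_neg (by intro h; exact absurd hgfk (not_le.mpr h.1))]
          rw [show f + b + 1 = (f + 1) + b from by ring]
          exact ih (f + 1) b (by omega) (by omega) hb0 hbR (by omega)
      · have hfe : f = Lv := by omega
        have hgfk : ¬ PySem.List.pyGetD books f 0 ≤ k := by
          rw [hfe]; exact not_le.mpr hLbad
        by_cases hb : b < Rv
        · have hgek : PySem.List.pyGetD books (n - 1 - b) 0 ≤ k := hRgood b hb0 hb
          rw [if_neg hgfk, if_neg hgfk, if_pos hgek, if_pos hgek,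
              if_neg (by intro h; exact absurd hgek (not_le.mpr h.2))]
          rw [show n - 1 - b - 1 = n - 1 - (b + 1) from by ring,
              show f + b + 1 = f + (b + 1) from by ring]
          exact ih f (b + 1) hf0 hfL (by omega) (by omega) (by omega)
        · have hbe : b = Rv := by omega
          have hgek : ¬ PySem.List.pyGetD books (n - 1 - b) 0 ≤ k := by
            rw [hbe]; exact not_le.mpr hRbad
          rw [if_neg hgfk, if_neg hgfk, if_neg hgek, if_neg hgek,
              if_pos ⟨not_le.mp hgfk, not_le.mp hgek⟩]
          omega
    · simp only [leftLoopA, if_neg he]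
      omega

lemma loopA_all (books : List Int) (n k : Int) (hlen : n ≤ (books.length : Int))
    (hall : ∀ i, 0 ≤ i → i < n → PySem.List.pyGetD books i 0 ≤ k) :
    ∀ (fuel : Nat) (t : Int), 0 ≤ t → 2 * t ≤ n → n - 1 - 2 * t ≤ (fuel : Int) →
      leftLoopA books k fuel t (n - 1 - t) (2 * t) = n - PySem.Int.mod n 2 := by
  have hmod : PySem.Int.mod n 2 = n % 2 := PySem.Int.mod_eq_emod_of_pos (by norm_num)
  intro fuel
  induction fuel with
  | zero =>
    intro t ht0 htn hfuel
    simp only [leftLoopA]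
    simp at hfuel
    rw [hmod]; omega
  | succ fuel ih =>
    intro t ht0 htn hfuel
    by_cases he : n - 1 - t > t
    · have hgf := get_some books t ht0 (by omega)
      have hge := get_some books (n - 1 - t) (by omega) (by omega)
      have hgfk : PySem.List.pyGetD books t 0 ≤ k := hall t ht0 (by omega)
      have hgek : PySem.List.pyGetD books (n - 1 - t) 0 ≤ k := hall (n - 1 - t) (by omega) (by omega)
      simp only [leftLoopA, if_pos he, hgf, hge]
      rw [if_pos hgfk, if_pos hgfk, if_pos hgek, if_pos hgek,
          if_neg (by intro h; exact absurd hgfk (not_le.mpr h.1))]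
      push_cast at hfuel
      rw [show n - 1 - t - 1 = n - 1 - (t + 1) from by ring,
          show 2 * t + 1 + 1 = 2 * (t + 1) from by ring]
      exact ih (t + 1) (by omega) (by omega) (by omega)
    · simp only [leftLoopA, if_neg he]
      push_cast at hfuel
      rw [hmod]; omega

-- ===== VERDICT (by name: the statement is the Claim_ definition above) =====
theorem left_books_spec : Claim_equal_left_books := by
  intro books n k _dom hpre
  by_cases hn0 : 0 ≤ n
  case neg =>
    -- n < 0: A's loop body never runs (fuel n.toNat = 0), B's scans stay at 0
    have ht0 : n.toNat = 0 := Int.toNat_of_nonpos (by omega)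
    unfold Spec_left_books left_books left_books_alt
    rw [ht0]
    simp only [leftLoopA, scanLB, scanRB]
    rw [if_neg (by omega : ¬ (0 : Int) = n)]
    ring
  have hlen : n ≤ (books.length : Int) := by
    rcases hpre with h | h
    · exact h
    · omega
  have hnt : ((n.toNat : Nat) : Int) = n := Int.toNat_of_nonneg hn0
  unfold Spec_left_books left_books left_books_alt
  obtain ⟨hL0, hLn, hLgood, hLbad⟩ :=
    scanLB_spec books n k hlen n.toNat 0 le_rfl hn0 (by omega)
  set Lv := scanLB books n k n.toNat 0 with hLdef
  by_cases hcase : Lv = n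
  · rw [if_pos hcase]
    have hall : ∀ i, 0 ≤ i → i < n → PySem.List.pyGetD books i 0 ≤ k := by
      intro i h1 h2; exact hLgood i h1 (by omega)
    have hloop := loopA_all books n k hlen hall n.toNat 0 le_rfl (by omega) (by omega)
    rw [show n - 1 - 0 = n - 1 from by ring, show (2 : Int) * 0 = 0 from by ring] at hloop
    rw [hloop]; ring
  · rw [if_neg hcase]
    have hLlt : Lv < n := lt_of_le_of_ne hLn hcase
    have hLb := hLbad hLlt
    obtain ⟨hR0, hRb, hRgood, hRbad⟩ :=
      scanRB_spec books n k Lv hlen hL0 hLlt hLb n.toNat 0 le_rfl (by omega) (by omega)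
    set Rv := scanRB books n k Lv n.toNat 0 with hRdef
    have hloop := loopA_lt books n k Lv Rv hlen hL0 hLlt hLgood hLb hR0 hRb hRgood hRbad
      n.toNat 0 0 le_rfl hL0 le_rfl hR0 (by omega)
    rw [show n - 1 - 0 = n - 1 from by ring, show (0 : Int) + 0 = 0 from by ring] at hloop
    rw [hloop]; ring
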